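-- pv_equiv track=rewrite | github.com/EVIEHub/DeXposure-FM | run_full_experiment.py | find_nearest_date
-- ===== SOURCE A (Python) =====
-- from typing import Any, Dict, List, Optional, Tuple
--
-- def find_nearest_date(target: str, dates: List[str]) -> Optional[str]:
--     """Find the nearest date in the list to the target date."""
--     if not dates:
--         return None
--     sorted_dates = sorted(dates)
--     for d in sorted_dates:
--         if d >= target:
--             return d
--     return sorted_dates[-1]
-- ===== SOURCE B (Python) =====
-- def find_nearest_date(target, dates):
--     """Find the nearest date in the list to the target date."""
--     if not dates:
--         return None
--     ge = [d for d in dates if d >= target]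
--     return min(ge) if ge else max(dates)
-- ===== Notes on version B (the rewrite author's own statement) =====
-- stated objective: faster
-- what changed: Replaced sort-then-linear-scan with a single filter of dates >= target followed by min (or max of all dates when none qualify), removing the O(n log n) sort.
import Mathlib
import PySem

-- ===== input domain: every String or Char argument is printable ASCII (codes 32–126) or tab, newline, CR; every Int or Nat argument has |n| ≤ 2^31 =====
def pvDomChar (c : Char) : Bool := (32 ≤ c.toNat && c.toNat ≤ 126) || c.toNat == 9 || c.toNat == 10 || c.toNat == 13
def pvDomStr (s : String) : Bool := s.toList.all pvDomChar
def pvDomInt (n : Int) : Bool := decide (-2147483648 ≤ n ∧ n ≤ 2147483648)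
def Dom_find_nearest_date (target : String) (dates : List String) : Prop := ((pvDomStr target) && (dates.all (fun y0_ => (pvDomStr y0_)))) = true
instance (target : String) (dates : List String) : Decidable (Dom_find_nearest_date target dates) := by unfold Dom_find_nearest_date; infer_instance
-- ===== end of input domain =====

-- B replaces A's sort-then-scan by one filter of the dates ≥ target followed by min (else max of all): no sort.

-- ===== PORT A =====
-- 'for d in sorted_dates: if d >= target: return d' then 'return sorted_dates[-1]'
def pvALoop (target : String) (sorted_dates : List String) : List String → Option String
  | [] => PySem.List.pyGet? sorted_dates (-1)
  | d :: rest => if target ≤ d then some d else pvALoop target sorted_dates rest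

def find_nearest_date (target : String) (dates : List String) : Option String :=
  if dates = [] then none
  else
    let sorted_dates := PySem.List.sorted dates (fun x => x)
    pvALoop target sorted_dates sorted_dates

-- ===== PORT B =====
def find_nearest_date_alt (target : String) (dates : List String) : Option String :=
  if dates = [] then none
  else
    let ge := dates.filter (fun d => decide (target ≤ d))
    if ge = [] then PySem.List.max? dates (fun x => x)
    else PySem.List.min? ge (fun x => x)

-- ===== PRECONDITION & SPEC =====
def Spec_find_nearest_date (target : String) (dates : List String) (out : Option String) : Prop := out = find_nearest_date_alt target dates
instance (target : String) (dates : List String) (out : Option String) : Decidable (Spec_find_nearest_date target dates out) := by unfold Spec_find_nearest_date; infer_instance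

-- ===== CLAIM (what is proved, stated in full; the proofs are below) =====
def Claim_equal_find_nearest_date : Prop := ∀ (target : String) (dates : List String), Dom_find_nearest_date target dates → Spec_find_nearest_date target dates (find_nearest_date target dates)

-- ===== LEMMAS AND PROOFS =====

-- A's loop over the sorted list is find? with fallback to the last element.
lemma pvALoop_eq (target : String) (s : List String) :
    ∀ l, pvALoop target s l =
      match l.find? (fun d => decide (target ≤ d)) with
      | some d => some d
      | none => PySem.List.pyGet? s (-1) := by
  intro l
  induction l with
  | nil => simp [pvALoop]
  | cons d rest ih =>
    by_cases h : target ≤ d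
    · simp [pvALoop, h, List.find?]
    · simp [pvALoop, h, List.find?, ih]

lemma pyGet?_neg_one_eq_getLast? (xs : List String) (h : xs ≠ []) :
    PySem.List.pyGet? xs (-1) = xs.getLast? := by
  have hlen : 0 < xs.length := List.length_pos_iff.mpr h
  simp only [PySem.List.pyGet?, PySem.List.pyIdx?]
  rw [if_neg (show ¬ (0:Int) ≤ -1 by omega), if_pos (show -(xs.length:Int) ≤ -1 by omega)]
  simp [List.getLast?_eq_getElem?]

lemma pairwise_le_getLast? :
    ∀ (s : List String), s.Pairwise (· ≤ ·) → ∀ m, s.getLast? = some m → ∀ x ∈ s, x ≤ m := by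
  intro s
  induction s with
  | nil => simp
  | cons a t ih =>
    intro hp m hm x hx
    rcases List.pairwise_cons.mp hp with ⟨ha, ht⟩
    cases t with
    | nil =>
      simp at hm hx
      simp [hx, hm]
    | cons b t' =>
      rw [List.getLast?_cons_cons] at hm
      rcases List.mem_cons.mp hx with rfl | hx'
      · have hbm : b ≤ m := ih ht m hm b (by simp)
        exact le_trans (ha b (by simp)) hbm
      · exact ih ht m hm x hx'

lemma find?_min_of_sorted (target : String) :
    ∀ (s : List String), s.Pairwise (· ≤ ·) →
      ∀ d, s.find? (fun x => decide (target ≤ x)) = some d →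
        target ≤ d ∧ d ∈ s ∧ ∀ y ∈ s, target ≤ y → d ≤ y := by
  intro s
  induction s with
  | nil => simp
  | cons a t ih =>
    intro hp d hf
    rcases List.pairwise_cons.mp hp with ⟨ha, ht⟩
    by_cases h : target ≤ a
    · rw [List.find?_cons_of_pos (by simpa using h)] at hf
      injection hf with hf
      subst hf
      refine ⟨h, by simp, ?_⟩
      intro y hy _
      rcases List.mem_cons.mp hy with rfl | hy'
      · exact le_refl _
      · exact ha y hy'
    · rw [List.find?_cons_of_neg (by simpa using h)] at hf
      rcases ih ht d hf with ⟨h1, h2, h3⟩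
      refine ⟨h1, List.mem_cons_of_mem _ h2, ?_⟩
      intro y hy hty
      rcases List.mem_cons.mp hy with rfl | hy'
      · exact absurd hty h
      · exact h3 y hy' hty

-- ===== VERDICT (by name: the statement is the Claim_ definition above) =====
theorem find_nearest_date_spec : Claim_equal_find_nearest_date := by
  intro target dates _
  unfold Spec_find_nearest_date
  by_cases hd : dates = []
  · simp [find_nearest_date, find_nearest_date_alt, hd]
  · have hperm : (PySem.List.sorted dates (fun x => x)).Perm dates :=
      PySem.List.sorted_perm dates (fun x => x) false
    have hpair : (PySem.List.sorted dates (fun x => x)).Pairwise (· ≤ ·) :=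
      PySem.List.sorted_pairwise dates (fun x => x)
    set s := PySem.List.sorted dates (fun x => x) with hs
    have hsne : s ≠ [] := by
      intro h0
      exact hd (List.Perm.nil_eq (h0 ▸ hperm)).symm
    have hmem : ∀ x, x ∈ s ↔ x ∈ dates := fun x => hperm.mem_iff
    simp only [find_nearest_date, find_nearest_date_alt, hd, ← hs]
    rw [pvALoop_eq]
    by_cases hge : dates.filter (fun d => decide (target ≤ d)) = []
    · -- no date ≥ target: A falls through to s[-1]; B takes max(dates)
      have hnone : ∀ x ∈ dates, ¬ target ≤ x := by
        intro x hx
        have := List.filter_eq_nil_iff.mp hge x hx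
        simpa using this
      have hfind : s.find? (fun x => decide (target ≤ x)) = none := by
        apply List.find?_eq_none.mpr
        intro x hx
        simpa using hnone x ((hmem x).mp hx)
      simp only [hfind]
      rw [pyGet?_neg_one_eq_getLast? s hsne, if_pos hge]
      obtain ⟨m, hm⟩ := List.getLast?_isSome.mpr hsne |> Option.isSome_iff_exists.mp
      have hmmem : m ∈ s := List.mem_of_getLast? hm
      have hmax : ∀ x ∈ s, x ≤ m := pairwise_le_getLast? s hpair m hm
      cases hB : PySem.List.max? dates (fun x => x) with
      | none => exact absurd ((PySem.List.max?_eq_none_iff dates _).mp hB) hd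
      | some m' =>
        have hm'mem : m' ∈ dates := PySem.List.max?_mem hB
        have hm'max : ∀ y ∈ dates, y ≤ m' := PySem.List.max?_isMax hB
        have hmm : m = m' := le_antisymm (hm'max m ((hmem m).mp hmmem)) (hmax m' ((hmem m').mpr hm'mem))
        simp [hm, hmm]
    · -- some date ≥ target: A returns the first such in sorted order, B the min of the filter
      rw [if_neg hge]
      cases hB : PySem.List.min? (dates.filter (fun d => decide (target ≤ d))) (fun x => x) with
      | none => exact absurd ((PySem.List.min?_eq_none_iff _ _).mp hB) hge
      | some mB =>
        have hmBf : mB ∈ dates.filter (fun d => decide (target ≤ d)) := PySem.List.min?_mem hB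
        have hmBmin : ∀ y ∈ dates.filter (fun d => decide (target ≤ d)), mB ≤ y :=
          PySem.List.min?_isMin hB
        rcases List.mem_filter.mp hmBf with ⟨hmBd, hmBt⟩
        have hmBt' : target ≤ mB := by simpa using hmBt
        cases hf : s.find? (fun x => decide (target ≤ x)) with
        | none =>
          exfalso
          have := List.find?_eq_none.mp hf mB ((hmem mB).mpr hmBd)
          simp [hmBt'] at this
        | some d =>
          rcases find?_min_of_sorted target s hpair d hf with ⟨h1, h2, h3⟩
          have hdge : d ∈ dates.filter (fun x => decide (target ≤ x)) :=
            List.mem_filter.mpr ⟨(hmem d).mp h2, by simpa using h1⟩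
          have hdm : d = mB := le_antisymm (h3 mB ((hmem mB).mpr hmBd) hmBt') (hmBmin d hdge)
          simp [hdm]
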